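-- pv_equiv track=rewrite | github.com/juvelop17/problem_solving | Codeforces/#704_DIV2/!C.py | solution
-- ===== SOURCE A (Python) =====
-- from collections import deque
--
-- def solution(n, m, s, t):
--     totalmax = 0
--     que = deque()
--
--     que.append((0, 0, 0, -1))
--     while que:
--         curs, curt, curmax, prevs = que.popleft()
--
--         if m - curt > n - curs:
--             continue
--         if curt == m:
--             if totalmax < curmax:
--                 totalmax = curmax
--             continue
--
--         if s[curs] == t[curt]:
--             nextmax = curmax
--             if curmax < curs - prevs and prevs != -1:
--                 nextmax = curs - prevs
--             que.append((curs+1,curt+1,nextmax,curs))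
--         que.append((curs + 1, curt, curmax, prevs))
--
--     return totalmax
-- ===== SOURCE B (Python) =====
-- def match_left(s, t):
--     # greedy leftmost subsequence match; list of positions, or None if t is not a subsequence of s
--     pos = []
--     i = 0
--     for ch in t:
--         while i < len(s) and s[i] != ch:
--             i += 1
--         if i == len(s):
--             return None
--         pos.append(i)
--         i += 1
--     return pos
--
-- def solution(n, m, s, t):
--     if m > n:
--         return 0  # t is declared longer than s: it cannot be a subsequence
--     s = s[:n]
--     t = t[:m]
--     a = match_left(s, t)
--     if a is None or len(t) < 2:
--         return 0
--     rb = match_left(s[::-1], t[::-1])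
--     b = [len(s) - 1 - q for q in reversed(rb)]
--     ans = 0
--     for j in range(len(t) - 1):
--         if b[j + 1] - a[j] > ans:
--             ans = b[j + 1] - a[j]
--     return ans
-- ===== Notes on version B (the rewrite author's own statement) =====
-- stated objective: alternative
-- what changed: A enumerates every embedding of t into s with a breadth-first search over a deque of (s-pos, t-pos, max-gap, prev-pos) states; B computes the greedy leftmost match positions a and the rightmost match positions b (leftmost match on the reversed strings) and returns max(b[j+1]-a[j]) in one pass.
-- outside the precondition, e.g. on solution(0, -1, 'ab', 'z'): A returns 0, B returns 0
import Mathlib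
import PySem

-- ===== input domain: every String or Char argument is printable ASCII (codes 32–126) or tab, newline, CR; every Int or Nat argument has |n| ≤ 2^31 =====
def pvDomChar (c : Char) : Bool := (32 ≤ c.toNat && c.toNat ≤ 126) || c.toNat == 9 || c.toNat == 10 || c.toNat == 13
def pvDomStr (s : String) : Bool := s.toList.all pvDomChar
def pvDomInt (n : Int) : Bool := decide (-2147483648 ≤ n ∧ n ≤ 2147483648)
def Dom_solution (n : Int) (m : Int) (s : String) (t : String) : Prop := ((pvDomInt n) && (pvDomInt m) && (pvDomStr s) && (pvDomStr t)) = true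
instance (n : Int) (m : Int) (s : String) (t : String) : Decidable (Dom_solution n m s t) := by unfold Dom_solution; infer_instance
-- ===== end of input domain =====

-- B replaces A's breadth-first enumeration of all embeddings of t into s by the greedy
-- leftmost/rightmost matching arrays and one max-of-gaps pass (objective: alternative).

-- ===== PORT A =====
-- A's BFS queue loop; the Nat counter only makes the recursion total (it is provably
-- sufficient under Pre_solution, see pvPhi below), each iteration is one Python iteration.
def solLoop (n m : Int) (s t : String) : Nat → List (Int × Int × Int × Int) → Int → Int
  | 0, _, totalmax => totalmax
  | fuel + 1, que, totalmax =>
    match que with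
    | [] => totalmax
    | (curs, curt, curmax, prevs) :: rest =>
      if m - curt > n - curs then solLoop n m s t fuel rest totalmax
      else if curt = m then
        solLoop n m s t fuel rest (if totalmax < curmax then curmax else totalmax)
      else
        match PySem.Str.pyGet? s curs, PySem.Str.pyGet? t curt with
        | some sc, some tc =>
            let rest1 := if sc = tc then
                rest ++ [(curs + 1, curt + 1,
                  (if curmax < curs - prevs ∧ prevs ≠ -1 then curs - prevs else curmax), curs)]
              else rest
            solLoop n m s t fuel (rest1 ++ [(curs + 1, curt, curmax, prevs)]) totalmax
        | _, _ => totalmax  -- Python raises IndexError here; Pre_solution excludes these inputs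

def solution (n : Int) (m : Int) (s : String) (t : String) : Int :=
  solLoop n m s t (3 ^ (n.toNat + 2)) [(0, 0, 0, -1)] 0

-- ===== PORT B =====
-- while i < len(s) and s[i] != ch: i += 1   (fuel (len s - i).toNat makes it total and is exact)
def mlWhile (s : String) (ch : Char) : Int → Nat → Int
  | i, 0 => i
  | i, fuel + 1 =>
    if i < PySem.Str.len s ∧ PySem.Str.pyGet? s i ≠ some ch then mlWhile s ch (i + 1) fuel
    else i

def matchLeftAux (s : String) : List Char → Int → List Int → Option (List Int)
  | [], _, pos => some pos
  | ch :: tl, i, pos =>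
    let i' := mlWhile s ch i (PySem.Str.len s - i).toNat
    if i' = PySem.Str.len s then none
    else matchLeftAux s tl (i' + 1) (pos ++ [i'])

def matchLeft (s t : String) : Option (List Int) := matchLeftAux s t.toList 0 []

def solution_alt (n : Int) (m : Int) (s : String) (t : String) : Int :=
  -- Source B's locals s, t, a, rb, b are inlined here (s := s[:n], t := t[:m], [::-1] via slice?)
  if m > n then 0   -- t is declared longer than s: it cannot be a subsequence
  else match matchLeft (PySem.Str.slice s none (some n)) (PySem.Str.slice t none (some m)) with
  | none => 0
  | some a =>
    if PySem.Str.len (PySem.Str.slice t none (some m)) < 2 then 0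
    else
      match matchLeft ((PySem.Str.slice? (PySem.Str.slice s none (some n)) none none (-1)).getD "")
          ((PySem.Str.slice? (PySem.Str.slice t none (some m)) none none (-1)).getD "") with
      | none => 0   -- unreachable: the reversed match exists whenever the forward one does
      | some rb =>
        (PySem.List.pyRange 0 (PySem.Str.len (PySem.Str.slice t none (some m)) - 1) 1).foldl
          (fun ans j =>
            if PySem.List.pyGetD (rb.reverse.map
                  (fun q => PySem.Str.len (PySem.Str.slice s none (some n)) - 1 - q)) (j + 1) 0
                - PySem.List.pyGetD a j 0 > ans
            then PySem.List.pyGetD (rb.reverse.map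
                  (fun q => PySem.Str.len (PySem.Str.slice s none (some n)) - 1 - q)) (j + 1) 0
                - PySem.List.pyGetD a j 0 else ans) 0


-- ===== PRECONDITION & SPEC =====
-- Pre_solution admits every input with m > n (A prunes them immediately and returns 0) and,
-- when m ≤ n, the inputs consistent with the actual string lengths (0 ≤ m ≤ n ≤ len s, m ≤ len t);
-- it excludes the m ≤ n inputs with negative or oversized n/m, on which A's s[curs]/t[curt]
-- can run past the end of a string and raise IndexError (whether it raises depends on the
-- string contents, so some of those excluded inputs still return, e.g. the cited one).
def Pre_solution (n : Int) (m : Int) (s : String) (t : String) : Prop :=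
  n < m ∨ (0 ≤ m ∧ m ≤ n ∧ n ≤ PySem.Str.len s ∧ m ≤ PySem.Str.len t)
instance (n : Int) (m : Int) (s : String) (t : String) : Decidable (Pre_solution n m s t) := by
  unfold Pre_solution; infer_instance

def pvWitness_solution : Int × Int × String × String := (3, 2, "aba", "ab")

def Spec_solution (n : Int) (m : Int) (s : String) (t : String) (out : Int) : Prop := out = solution_alt n m s t
instance (n : Int) (m : Int) (s : String) (t : String) (out : Int) : Decidable (Spec_solution n m s t out) := by unfold Spec_solution; infer_instance

-- ===== CLAIM (what is proved, stated in full; the proofs are below) =====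
def Claim_equal_solution : Prop := ∀ (n : Int) (m : Int) (s : String) (t : String), Dom_solution n m s t → Pre_solution n m s t → Spec_solution n m s t (solution n m s t)

-- ===== LEMMAS AND PROOFS =====

-- ---------- proof-layer combinators ----------
def omaxI (a : Int) : Option Int → Int
  | none => a
  | some v => max a v

def omaxO : Option Int → Option Int → Option Int
  | none, o => o
  | some a, none => some a
  | some a, some b => some (max a b)

def omap2 (f : List Int → List Int → Int) : Option (List Int) → Option (List Int) → Option Int
  | some l, some r => some (f l r)
  | _, _ => none

-- the value A's search assigns to a state: best final curmax over all completions
def bestS : List Char → List Char → Int → Int → Int → Option Int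
  | _, [], _, cm, _ => some cm
  | [], _ :: _, _, _, _ => none
  | x :: S, c :: T, b, cm, p =>
    omaxO (if x = c then
             bestS S T (b + 1) (if cm < b - p ∧ p ≠ -1 then b - p else cm) b
           else none)
          (bestS S (c :: T) (b + 1) cm p)

-- greedy left-to-right scan: matched positions (base b) and the unmatched remainder of T
def scanL : List Char → List Char → Int → List Int × List Char
  | _, [], _ => ([], [])
  | [], c :: T, _ => ([], c :: T)
  | x :: S, c :: T, b =>
    if x = c then ((b :: (scanL S T (b + 1)).1, (scanL S T (b + 1)).2) : List Int × List Char)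
    else scanL S (c :: T) (b + 1)

def lseq (S T : List Char) (b : Int) : Option (List Int) :=
  if (scanL S T b).2 = [] then some (scanL S T b).1 else none

def rref (S : List Char) (b : Int) (l : List Int) : List Int :=
  l.reverse.map (fun q => b + (S.length : Int) - 1 - q)

def rpos (S T : List Char) (b : Int) : Option (List Int) :=
  (lseq S.reverse T.reverse 0).map (rref S b)

def gmax : Int → Int → List Int → List Int → Int
  | cm, _, [], _ => cm
  | cm, _, _ :: _, [] => cm
  | cm, p, x :: l, y :: r => gmax (if p = -1 then cm else max cm (y - p)) x l r

-- first index ≥ i whose character is ch (i + length if none)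
def fm (ch : Char) : List Char → Int → Int
  | [], i => i
  | x :: L, i => if x = ch then i else fm ch L (i + 1)

def pvVal (S T : List Char) (st : Int × Int × Int × Int) : Option Int :=
  bestS (S.drop st.1.toNat) (T.drop st.2.1.toNat) st.1 st.2.2.1 st.2.2.2

def pvPhi (n : Int) (que : List (Int × Int × Int × Int)) : Nat :=
  (que.map (fun st => 3 ^ ((n - st.1).toNat + 1))).sum

def pvInv (n m : Int) (st : Int × Int × Int × Int) : Prop :=
  0 ≤ st.1 ∧ st.1 ≤ n ∧ 0 ≤ st.2.1 ∧ st.2.1 ≤ m ∧ (st.2.2.2 = -1 ∨ 0 ≤ st.2.2.2)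

-- ---------- scan lemmas ----------
theorem scanL_append (S1 S2 T : List Char) (b : Int) :
    scanL (S1 ++ S2) T b =
      ((scanL S1 T b).1 ++ (scanL S2 (scanL S1 T b).2 (b + S1.length)).1,
       (scanL S2 (scanL S1 T b).2 (b + S1.length)).2) := by
  induction S1 generalizing T b with
  | nil =>
    cases T with
    | nil => simp [scanL]
    | cons c T => simp [scanL]
  | cons x S1 ih =>
    cases T with
    | nil => simp [scanL]
    | cons c T =>
      by_cases hxc : x = c
      · simp only [List.cons_append, scanL, if_pos hxc, List.length_cons]
        rw [ih]
        have harith : b + ((S1.length : Int) + 1) = b + 1 + S1.length := by ring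
        push_cast
        rw [harith]
      · simp only [List.cons_append, scanL, if_neg hxc, List.length_cons]
        rw [ih]
        have harith : b + ((S1.length : Int) + 1) = b + 1 + S1.length := by ring
        push_cast
        rw [harith]


theorem scanL_mem_bounds (S T : List Char) (b : Int) :
    ∀ q ∈ (scanL S T b).1, b ≤ q ∧ q < b + S.length := by
  induction S generalizing T b with
  | nil =>
    cases T with
    | nil => simp [scanL]
    | cons c T => simp [scanL]
  | cons x S ih =>
    cases T with
    | nil => simp [scanL]
    | cons c T =>
      by_cases hxc : x = c
      · simp only [scanL, if_pos hxc]
        intro q hq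
        simp only [List.mem_cons] at hq
        rcases hq with h | h
        · subst h
          simp only [List.length_cons]
          push_cast
          omega
        · have := ih T (b + 1) q h
          simp only [List.length_cons]
          push_cast
          omega
      · simp only [scanL, if_neg hxc]
        intro q hq
        have := ih (c :: T) (b + 1) q hq
        simp only [List.length_cons]
        push_cast
        omega


theorem scanL_len (S T : List Char) (b : Int) (h : (scanL S T b).2 = []) :
    (scanL S T b).1.length = T.length := by
  induction S generalizing T b with
  | nil =>
    cases T with
    | nil => simp [scanL]
    | cons c T => simp [scanL] at h
  | cons x S ih =>
    cases T with
    | nil => simp [scanL]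
    | cons c T =>
      by_cases hxc : x = c
      · simp only [scanL, if_pos hxc] at h ⊢
        simp [ih T (b + 1) h]
      · simp only [scanL, if_neg hxc] at h ⊢
        simpa using ih (c :: T) (b + 1) h


theorem scanL_done_iff (S T : List Char) (b : Int) :
    (scanL S T b).2 = [] ↔ T.Sublist S := by
  induction S generalizing T b with
  | nil =>
    cases T with
    | nil => simp [scanL]
    | cons c T => simp [scanL]
  | cons x S ih =>
    cases T with
    | nil => simp [scanL]
    | cons c T =>
      by_cases hxc : x = c
      · subst hxc
        simp only [scanL, if_true]
        rw [ih T (b + 1), List.cons_sublist_cons]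
      · simp only [scanL, if_neg hxc]
        rw [ih (c :: T) (b + 1), List.sublist_cons_iff]
        constructor
        · exact fun h => Or.inl h
        · rintro (h | ⟨r, hr, hsub⟩)
          · exact h
          · exact absurd (by injection hr with h1 _; exact h1.symm) hxc


theorem pvF2_refl (l : List Int) : List.Forall₂ (· ≤ ·) l l := by
  induction l with
  | nil => constructor
  | cons x l ih => exact List.Forall₂.cons (le_refl x) ih

theorem pvF2_trans {l1 l2 l3 : List Int} (h1 : List.Forall₂ (· ≤ ·) l1 l2)
    (h2 : List.Forall₂ (· ≤ ·) l2 l3) : List.Forall₂ (· ≤ ·) l1 l3 := by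
  induction h1 generalizing l3 with
  | nil => cases h2; constructor
  | cons hab h ih =>
    cases h2 with
    | cons hbc h' => exact List.Forall₂.cons (le_trans hab hbc) (ih h')

theorem scanL_snoc_rem (S T1 : List Char) (c : Char) (b : Int)
    (h : (scanL S (T1 ++ [c]) b).2 = [c]) :
    scanL S T1 b = ((scanL S (T1 ++ [c]) b).1, []) := by
  induction S generalizing T1 b with
  | nil =>
    cases T1 with
    | nil => simp [scanL]
    | cons d T2 => simp [scanL] at h
  | cons x S ih =>
    cases T1 with
    | nil =>
      by_cases hxc : x = c
      · subst hxc
        simp [scanL] at h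
      · simp only [List.nil_append, scanL, if_neg hxc] at h ⊢
        have h1 : (scanL S [c] (b + 1)).1 = ([] : List Int) := by
          have h2 := ih [] (b + 1) (by simpa using h)
          simp [scanL, Prod.ext_iff] at h2
          exact h2
        simp [h1]
    | cons d T2 =>
      by_cases hxd : x = d
      · subst hxd
        simp only [List.cons_append, scanL, if_true] at h ⊢
        have h2 := ih T2 (b + 1) h
        simp [h2]
      · simp only [List.cons_append, scanL, if_neg hxd] at h ⊢
        exact ih (d :: T2) (b + 1) h


theorem scanL_snoc_done (S T1 : List Char) (c : Char) (b : Int)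
    (h : (scanL S (T1 ++ [c]) b).2 = []) :
    ∃ ps q, scanL S (T1 ++ [c]) b = (ps ++ [q], []) ∧ scanL S T1 b = (ps, []) := by
  induction S generalizing T1 b with
  | nil =>
    exfalso
    cases T1 <;> simp [scanL] at h
  | cons x S ih =>
    cases T1 with
    | nil =>
      by_cases hxc : x = c
      · subst hxc
        exact ⟨[], b, by simp [scanL], by simp [scanL]⟩
      · simp only [List.nil_append, scanL, if_neg hxc] at h ⊢
        obtain ⟨ps, q, h1, h2⟩ := ih [] (b + 1) h
        have hps : ps = [] := by simpa [scanL, Prod.ext_iff] using h2.symm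
        subst hps
        exact ⟨[], q, h1, by simp⟩
    | cons d T2 =>
      by_cases hxd : x = d
      · subst hxd
        simp only [List.cons_append, scanL, if_true] at h ⊢
        obtain ⟨ps, q, h1, h2⟩ := ih T2 (b + 1) h
        exact ⟨b :: ps, q, by simp [h1], by simp [h2]⟩
      · simp only [List.cons_append, scanL, if_neg hxd] at h ⊢
        exact ih (d :: T2) (b + 1) h


-- leftmost is pointwise minimal: dropping the first target char only moves matches left
theorem scanL_drop_min (S : List Char) : ∀ (T : List Char) (c : Char) (b : Int) (x : Int) (ls : List Int),
    scanL S (c :: T) b = (x :: ls, []) →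
    ∃ l', scanL S T b = (l', []) ∧ List.Forall₂ (· ≤ ·) l' ls := by
  induction S with
  | nil =>
    intro T c b x ls h
    simp [scanL, Prod.ext_iff] at h
  | cons x0 S ih =>
    intro T c b x ls h
    by_cases h0 : x0 = c
    · subst h0
      simp only [scanL, if_true, Prod.ext_iff] at h
      obtain ⟨h1, h2⟩ := h
      injection h1 with hx hls
      cases T with
      | nil =>
        refine ⟨[], by simp [scanL], ?_⟩
        have he : (scanL S [] (b + 1)).1 = ([] : List Int) := by simp [scanL]
        rw [← hls, he]
        constructor
      | cons d T2 =>
        by_cases h1' : x0 = d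
        · subst h1'
          have hlen := scanL_len S (x0 :: T2) (b + 1) h2
          obtain ⟨x2, ls2, hdec⟩ : ∃ x2 ls2, (scanL S (x0 :: T2) (b + 1)).1 = x2 :: ls2 := by
            cases hcase : (scanL S (x0 :: T2) (b + 1)).1 with
            | nil => rw [hcase] at hlen; simp at hlen
            | cons a as => exact ⟨a, as, rfl⟩
          obtain ⟨l3, h3, h4⟩ := ih T2 x0 (b + 1) x2 ls2 (Prod.ext_iff.mpr ⟨hdec, h2⟩)
          refine ⟨b :: l3, by simp [scanL, h3], ?_⟩
          rw [← hls, hdec]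
          refine List.Forall₂.cons ?_ h4
          have hb := scanL_mem_bounds S (x0 :: T2) (b + 1) x2
            (by rw [hdec]; exact List.mem_cons_self)
          omega
        · refine ⟨ls, ?_, pvF2_refl ls⟩
          simp only [scanL, if_neg h1']
          exact Prod.ext_iff.mpr ⟨hls, h2⟩
    · simp only [scanL, if_neg h0] at h
      obtain ⟨l'', h3, h4⟩ := ih T c (b + 1) x ls h
      cases T with
      | nil =>
        have hls0 : ls = [] := by
          have hlen := scanL_len S [c] (b + 1) (by rw [h])
          rw [h] at hlen
          simpa using hlen
        subst hls0
        exact ⟨[], by simp [scanL], List.Forall₂.nil⟩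
      | cons d T2 =>
        by_cases h1' : x0 = d
        · subst h1'
          obtain ⟨e, l2'', hdec⟩ : ∃ e l2'', l'' = e :: l2'' := by
            have hlen := scanL_len S (x0 :: T2) (b + 1) (by rw [h3])
            rw [h3] at hlen
            cases l'' with
            | nil => simp at hlen
            | cons a as => exact ⟨a, as, rfl⟩
          subst hdec
          rcases List.forall₂_cons_left_iff.1 h4 with ⟨f, ls2, hef, hl2, hlseq⟩
          obtain ⟨l3, h5, h6⟩ := ih T2 x0 (b + 1) e l2'' h3
          refine ⟨b :: l3, by simp [scanL, h5], ?_⟩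
          subst hlseq
          refine List.Forall₂.cons ?_ (pvF2_trans h6 hl2)
          have hb := scanL_mem_bounds S (c :: x0 :: T2) (b + 1) f
            (by rw [h]; exact List.mem_cons_of_mem _ List.mem_cons_self)
          omega
        · refine ⟨l'', ?_, h4⟩
          simp only [scanL, if_neg h1']
          exact h3


-- ---------- rpos lemmas ----------
theorem lseq_isSome_iff (S T : List Char) (b : Int) :
    (lseq S T b).isSome ↔ T.Sublist S := by
  rw [← scanL_done_iff S T b]
  unfold lseq
  split_ifs with h <;> simp [h]

theorem rpos_isSome_iff (S T : List Char) (b : Int) :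
    (rpos S T b).isSome ↔ T.Sublist S := by
  unfold rpos
  simp [lseq_isSome_iff, List.reverse_sublist]



theorem rpos_nil (S : List Char) (b : Int) : rpos S [] b = some [] := by
  simp [rpos, lseq, scanL, rref]


theorem rpos_skip (x : Char) (S T : List Char) (b : Int) (h : T.Sublist S) :
    rpos (x :: S) T b = rpos S T (b + 1) := by
  have hfeas : (scanL S.reverse T.reverse 0).2 = [] :=
    (scanL_done_iff _ _ _).2 (List.reverse_sublist.2 h)
  have h2 : scanL (S.reverse ++ [x]) T.reverse 0 = ((scanL S.reverse T.reverse 0).1, []) := by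
    rw [scanL_append, hfeas]
    simp [scanL]
  unfold rpos
  simp only [List.reverse_cons]
  have hl1 : lseq (S.reverse ++ [x]) T.reverse 0 = some (scanL S.reverse T.reverse 0).1 := by
    simp [lseq, h2]
  have hl2 : lseq S.reverse T.reverse 0 = some (scanL S.reverse T.reverse 0).1 := by
    simp [lseq, hfeas]
  rw [hl1, hl2]
  simp only [Option.map_some]
  congr 1
  unfold rref
  apply List.map_congr_left
  intro q _
  simp only [List.length_cons]
  push_cast
  ring

theorem rpos_take (c : Char) (S T : List Char) (b : Int)
    (hno : ¬ (c :: T).Sublist S) (hy : T.Sublist S) :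
    rpos (c :: S) (c :: T) b = (rpos S T (b + 1)).map (b :: ·) := by
  have hful : ((scanL (S.reverse ++ [c]) (T.reverse ++ [c]) 0).2 : List Char) = [] := by
    apply (scanL_done_iff _ _ _).2
    have : (c :: T).Sublist (c :: S) := List.cons_sublist_cons.2 hy
    have := List.reverse_sublist.2 this
    simpa [List.reverse_cons] using this
  have hnf : (scanL S.reverse (T.reverse ++ [c]) 0).2 ≠ [] := by
    intro hfe
    apply hno
    have := (scanL_done_iff _ _ _).1 hfe
    have h2 : (c :: T).reverse.Sublist S.reverse := by simpa [List.reverse_cons] using this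
    exact List.reverse_sublist.1 h2
  rw [scanL_append] at hful
  -- analyse the trailing scan of [c] over the remainder
  have hrem : (scanL S.reverse (T.reverse ++ [c]) 0).2 = [c] := by
    rcases hcase : (scanL S.reverse (T.reverse ++ [c]) 0).2 with _ | ⟨e, rest⟩
    · exact absurd hcase hnf
    · rw [hcase] at hful
      by_cases hce : c = e
      · subst hce
        rcases rest with _ | ⟨f, rest2⟩
        · rfl
        · simp [scanL] at hful
      · rw [scanL] at hful
        rw [if_neg (fun hh : c = e => hce hh)] at hful
        simp [scanL] at hful
  have hprefix := scanL_snoc_rem S.reverse T.reverse c 0 hrem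
  have hbig : scanL (S.reverse ++ [c]) (T.reverse ++ [c]) 0
      = ((scanL S.reverse (T.reverse ++ [c]) 0).1 ++ [(0 : Int) + S.reverse.length], []) := by
    rw [scanL_append, hrem]
    simp [scanL]
  unfold rpos
  simp only [List.reverse_cons]
  have hl1 : lseq (S.reverse ++ [c]) (T.reverse ++ [c]) 0
      = some ((scanL S.reverse (T.reverse ++ [c]) 0).1 ++ [(0 : Int) + S.reverse.length]) := by
    simp [lseq, hbig]
  have hl2 : lseq S.reverse T.reverse 0 = some ((scanL S.reverse (T.reverse ++ [c]) 0).1) := by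
    simp [lseq, hprefix]
  rw [hl1, hl2]
  simp only [Option.map_some]
  unfold rref
  simp only [List.reverse_append, List.reverse_cons, List.reverse_nil, List.nil_append,
    List.cons_append, List.map_cons]
  congr 1
  congr 1
  · simp only [List.length_cons, List.length_reverse]
    push_cast
    ring
  · apply List.map_congr_left
    intro q _
    simp only [List.length_cons]
    push_cast
    ring

theorem rpos_tail (S : List Char) (c : Char) (T : List Char) (b : Int) (y : Int) (r' : List Int)
    (h : rpos S (c :: T) b = some (y :: r')) :
    rpos S T b = some r' := by
  unfold rpos at h ⊢
  simp only [List.reverse_cons] at h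
  rcases hcase : lseq S.reverse (T.reverse ++ [c]) 0 with _ | ps
  · rw [hcase] at h; simp at h
  · rw [hcase] at h
    have hfe : (scanL S.reverse (T.reverse ++ [c]) 0).2 = [] := by
      by_contra hne
      simp [lseq, hne] at hcase
    have hps : ps = (scanL S.reverse (T.reverse ++ [c]) 0).1 := by
      simp [lseq, hfe] at hcase
      exact hcase.symm
    obtain ⟨ps0, q, h1, h2⟩ := scanL_snoc_done S.reverse T.reverse c 0 hfe
    have hlseq : lseq S.reverse T.reverse 0 = some ps0 := by
      simp [lseq, h2]
    rw [hlseq]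
    simp only [Option.map_some]
    have hps2 : ps = ps0 ++ [q] := by rw [hps, h1]
    rw [hps2] at h
    simp only [rref, List.reverse_append, List.reverse_cons, List.reverse_nil, List.nil_append,
      List.cons_append, List.map_cons, Option.map_some, Option.some.injEq, List.cons.injEq] at h
    simp only [rref]
    exact congrArg some h.2


theorem rpos_mem_bounds (S T : List Char) (b : Int) (r : List Int) (h : rpos S T b = some r) :
    ∀ q ∈ r, b ≤ q ∧ q < b + S.length := by
  unfold rpos at h
  rcases hcase : lseq S.reverse T.reverse 0 with _ | ps
  · rw [hcase] at h; simp at h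
  · rw [hcase] at h
    have hps : ps = (scanL S.reverse T.reverse 0).1 := by
      by_cases hfe : (scanL S.reverse T.reverse 0).2 = []
      · simp [lseq, hfe] at hcase; exact hcase.symm
      · simp [lseq, hfe] at hcase
    simp only [Option.map_some, Option.some.injEq] at h
    intro q hq
    rw [← h] at hq
    simp only [rref, List.mem_map, List.mem_reverse] at hq
    obtain ⟨q', hq', rfl⟩ := hq
    rw [hps] at hq'
    have := scanL_mem_bounds S.reverse T.reverse 0 q' hq'
    simp only [List.length_reverse] at this
    omega


theorem rpos_len (S T : List Char) (b : Int) (r : List Int) (h : rpos S T b = some r) :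
    r.length = T.length := by
  unfold rpos at h
  rcases hcase : lseq S.reverse T.reverse 0 with _ | ps
  · rw [hcase] at h; simp at h
  · rw [hcase] at h
    have hfe : (scanL S.reverse T.reverse 0).2 = [] := by
      by_contra hne
      simp [lseq, hne] at hcase
    have hps : ps = (scanL S.reverse T.reverse 0).1 := by
      simp [lseq, hfe] at hcase; exact hcase.symm
    simp only [Option.map_some, Option.some.injEq] at h
    rw [← h]
    have hlen := scanL_len S.reverse T.reverse 0 hfe
    simp only [rref, List.length_map, List.length_reverse]
    rw [hps, hlen, List.length_reverse]


-- ---------- gmax lemmas ----------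
theorem gmax_ge : ∀ (l r : List Int) (cm p : Int), cm ≤ gmax cm p l r := by
  intro l
  induction l with
  | nil => intro r cm p; simp [gmax]
  | cons x l ih =>
    intro r cm p
    cases r with
    | nil => simp [gmax]
    | cons y r =>
      simp only [gmax]
      refine le_trans ?_ (ih r _ x)
      split_ifs <;> omega

def pvRel (p p' : Int) : Prop := p = p' ∨ (0 ≤ p' ∧ p' ≤ p)

theorem gmax_mono : ∀ (l' l r r' : List Int) (cm cm' p p' : Int),
    cm ≤ cm' → pvRel p p' → (∀ z ∈ l', 0 ≤ z) →
    List.Forall₂ (· ≤ ·) l' l → List.Forall₂ (· ≤ ·) r r' →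
    gmax cm p l r ≤ gmax cm' p' l' r' := by
  intro l'
  induction l' with
  | nil =>
    intro l r r' cm cm' p p' h1 h2 h3 hll hrr
    cases hll
    cases hrr with
    | nil => simpa [gmax] using h1
    | cons hy hr => simpa [gmax] using h1
  | cons x' l0' ih =>
    intro l r r' cm cm' p p' h1 h2 h3 hll hrr
    cases hll with
    | cons hx hl =>
      cases hrr with
      | nil => simpa [gmax] using h1
      | cons hy hr =>
        simp only [gmax]
        apply ih
        · rcases h2 with heq | ⟨hp0, hpp⟩
          · subst heq; split_ifs <;> omega
          · have hpne : p ≠ -1 := by omega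
            have hpne' : p' ≠ -1 := by omega
            split_ifs <;> omega
        · right
          exact ⟨h3 _ List.mem_cons_self, hx⟩
        · intro z hz
          exact h3 z (List.mem_cons_of_mem _ hz)
        · exact hl
        · exact hr

theorem gmax_maxsplit : ∀ (l r : List Int) (c1 c2 p : Int),
    gmax (max c1 c2) p l r = max (gmax c1 p l r) (gmax c2 p l r) := by
  intro l
  induction l with
  | nil => intro r c1 c2 p; simp [gmax]
  | cons x l ih =>
    intro r c1 c2 p
    cases r with
    | nil => simp [gmax]
    | cons y r =>
      simp only [gmax]
      rw [← ih]
      congr 1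
      split_ifs <;> omega

theorem gmax_le_max : ∀ (l r : List Int) (c c' p : Int),
    gmax c p l r ≤ max c (gmax c' p l r) := by
  intro l
  induction l with
  | nil => intro r c c' p; simp [gmax]
  | cons x l ih =>
    intro r c c' p
    cases r with
    | nil => simp [gmax]
    | cons y r =>
      simp only [gmax]
      refine le_trans (ih r _ _ x) (max_le ?_ (le_max_right _ _))
      split_ifs with hp
      · exact le_max_left _ _
      · have hge := gmax_ge l r (max c' (y - p)) x
        have h3 : y - p ≤ gmax (max c' (y - p)) x l r := le_trans (le_max_right _ _) hge
        exact max_le (le_max_left _ _) (le_trans h3 (le_max_right _ _))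


-- ---------- the key lemma: A's search value in closed greedy form ----------
theorem bestS_eq (S : List Char) : ∀ (T : List Char) (b cm p : Int),
    0 ≤ b → (p = -1 ∨ 0 ≤ p) →
    bestS S T b cm p = omap2 (gmax cm p) (lseq S T b) (rpos S T b) := by
  induction S with
  | nil =>
    intro T b cm p hb hp
    cases T with
    | nil => simp [bestS, lseq, scanL, rpos_nil, omap2, gmax]
    | cons c T => simp [bestS, lseq, scanL, omap2]
  | cons x S ih =>
    intro T b cm p hb hp
    cases T with
    | nil => simp [bestS, lseq, scanL, rpos_nil, omap2, gmax]
    | cons c T =>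
      by_cases hskip : (c :: T).Sublist S
      · have hT'S : T.Sublist S := List.sublist_of_cons_sublist hskip
        by_cases hxc : x = c
        · subst hxc
          have hfl' : (scanL S T (b + 1)).2 = [] := (scanL_done_iff _ _ _).2 hT'S
          have hfl2 : (scanL S (x :: T) (b + 1)).2 = [] := (scanL_done_iff _ _ _).2 hskip
          have hlseqT : lseq S T (b + 1) = some (scanL S T (b + 1)).1 := by simp [lseq, hfl']
          have hlseq2 : lseq S (x :: T) (b + 1) = some (scanL S (x :: T) (b + 1)).1 := by
            simp [lseq, hfl2]
          have hlseqFull : lseq (x :: S) (x :: T) b = some (b :: (scanL S T (b + 1)).1) := by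
            simp [lseq, scanL, hfl']
          have hrSome : (rpos S (x :: T) (b + 1)).isSome := (rpos_isSome_iff _ _ _).2 hskip
          obtain ⟨r, hr⟩ := Option.isSome_iff_exists.1 hrSome
          have hrlen := rpos_len S (x :: T) (b + 1) r hr
          obtain ⟨y, r', rfl⟩ : ∃ y r', r = y :: r' := by
            cases r with
            | nil => simp at hrlen
            | cons a as => exact ⟨a, as, rfl⟩
          have hrT : rpos S T (b + 1) = some r' := rpos_tail S x T (b + 1) y r' hr
          have hrFull : rpos (x :: S) (x :: T) b = some (y :: r') := by
            rw [rpos_skip x S (x :: T) b hskip, hr]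
          have hl2len := scanL_len S (x :: T) (b + 1) hfl2
          obtain ⟨x2, l2', hdec⟩ : ∃ x2 l2', (scanL S (x :: T) (b + 1)).1 = x2 :: l2' := by
            cases hcase : (scanL S (x :: T) (b + 1)).1 with
            | nil => rw [hcase] at hl2len; simp at hl2len
            | cons a as => exact ⟨a, as, rfl⟩
          obtain ⟨l3, hl3, hl3le⟩ := scanL_drop_min S T x (b + 1) x2 l2' (Prod.ext_iff.mpr ⟨hdec, hfl2⟩)
          have hl3eq : (scanL S T (b + 1)).1 = l3 := by rw [hl3]
          have hyb : b + 1 ≤ y := (rpos_mem_bounds S (x :: T) (b + 1) _ hr y List.mem_cons_self).1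
          have hx2b : b + 1 ≤ x2 :=
            (scanL_mem_bounds S (x :: T) (b + 1) x2 (by rw [hdec]; exact List.mem_cons_self)).1
          have hl'pos : ∀ z ∈ l3, 0 ≤ z := by
            intro z hz
            rw [← hl3eq] at hz
            have := (scanL_mem_bounds S T (b + 1) z hz).1
            omega
          simp only [bestS, if_true]
          rw [ih T (b + 1) _ b (by omega) (Or.inr (by omega)),
              ih (x :: T) (b + 1) cm p (by omega) hp]
          rw [hlseqT, hlseq2, hrT, hr, hlseqFull, hrFull, hdec, hl3eq]
          simp only [omap2, omaxO]
          congr 1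
          -- pure gmax algebra
          have hupdA : (if cm < b - p ∧ p ≠ -1 then b - p else cm)
              = (if p = -1 then cm else max cm (b - p)) := by split_ifs <;> omega
          have hrhs : gmax cm p (b :: l3) (y :: r')
              = gmax (if p = -1 then cm else max cm (y - p)) b l3 r' := by simp only [gmax]
          have hbr2 : gmax cm p (x2 :: l2') (y :: r')
              = gmax (if p = -1 then cm else max cm (y - p)) x2 l2' r' := by simp only [gmax]
          rw [hupdA, hrhs, hbr2]
          set ub := if p = -1 then cm else max cm (b - p) with hub
          set uy := if p = -1 then cm else max cm (y - p) with huy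
          apply le_antisymm
          · apply max_le
            · exact gmax_mono l3 l3 r' r' ub uy b b
                (by rw [hub, huy]; split_ifs <;> omega)
                (Or.inl rfl) hl'pos (pvF2_refl l3) (pvF2_refl r')
            · exact gmax_mono l3 l2' r' r' uy uy x2 b
                (le_refl uy) (Or.inr ⟨hb, by omega⟩) hl'pos hl3le (pvF2_refl r')
          · rcases hp with hpm | hp0
            · have h1 : uy = ub := by rw [hub, huy, if_pos hpm, if_pos hpm]
              rw [h1]
              exact le_max_left _ _
            · have hpne : p ≠ -1 := by omega
              have hysplit : uy = max ub (y - p) := by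
                rw [hub, huy, if_neg hpne, if_neg hpne]
                rw [max_assoc]
                congr 1
                rw [max_eq_right (by omega : b - p ≤ y - p)]
              have hyB : y - p ≤ gmax uy x2 l2' r' := by
                refine le_trans ?_ (gmax_ge l2' r' uy x2)
                rw [huy, if_neg hpne]
                exact le_max_right _ _
              calc gmax uy b l3 r'
                  = max (gmax ub b l3 r') (gmax (y - p) b l3 r') := by
                    rw [hysplit, gmax_maxsplit]
                _ ≤ max (gmax ub b l3 r') (max (y - p) (gmax ub b l3 r')) :=
                    max_le_max (le_refl _) (gmax_le_max l3 r' (y - p) ub b)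
                _ ≤ max (gmax ub b l3 r') (gmax uy x2 l2' r') := by
                    apply max_le (le_max_left _ _)
                    exact max_le (le_trans hyB (le_max_right _ _)) (le_max_left _ _)
        · have hlseqEq : lseq (x :: S) (c :: T) b = lseq S (c :: T) (b + 1) := by
            simp [lseq, scanL, hxc]
          have hrEq := rpos_skip x S (c :: T) b hskip
          simp only [bestS, if_neg hxc]
          rw [ih (c :: T) (b + 1) cm p (by omega) hp, hlseqEq, hrEq]
          simp [omaxO]
      · by_cases hxc : x = c
        · subst hxc
          by_cases htake : T.Sublist S
          · have hfl' : (scanL S T (b + 1)).2 = [] := (scanL_done_iff _ _ _).2 htake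
            have hlseqT : lseq S T (b + 1) = some (scanL S T (b + 1)).1 := by simp [lseq, hfl']
            have hlseqFull : lseq (x :: S) (x :: T) b = some (b :: (scanL S T (b + 1)).1) := by
              simp [lseq, scanL, hfl']
            have hne2 : (scanL S (x :: T) (b + 1)).2 ≠ [] :=
              fun hfe => hskip ((scanL_done_iff _ _ _).1 hfe)
            have hlseq2 : lseq S (x :: T) (b + 1) = none := by simp [lseq, hne2]
            have hrT : (rpos S T (b + 1)).isSome := (rpos_isSome_iff _ _ _).2 htake
            obtain ⟨r1, hr1⟩ := Option.isSome_iff_exists.1 hrT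
            have hrFull : rpos (x :: S) (x :: T) b = some (b :: r1) := by
              rw [rpos_take x S T b hskip htake, hr1]
              rfl
            simp only [bestS, if_true]
            rw [ih T (b + 1) _ b (by omega) (Or.inr (by omega)),
                ih (x :: T) (b + 1) cm p (by omega) hp]
            rw [hlseqT, hlseq2, hr1, hlseqFull, hrFull]
            simp only [omap2, omaxO]
            congr 1
            simp only [gmax]
            congr 1
            split_ifs <;> omega
          · have hneT : (scanL S T (b + 1)).2 ≠ [] :=
              fun hfe => htake ((scanL_done_iff _ _ _).1 hfe)
            have hlseqT : lseq S T (b + 1) = none := by simp [lseq, hneT]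
            have hne2 : (scanL S (x :: T) (b + 1)).2 ≠ [] :=
              fun hfe => hskip ((scanL_done_iff _ _ _).1 hfe)
            have hlseq2 : lseq S (x :: T) (b + 1) = none := by simp [lseq, hne2]
            have hlseqFull : lseq (x :: S) (x :: T) b = none := by
              simp [lseq, scanL, hneT]
            simp only [bestS, if_true]
            rw [ih T (b + 1) _ b (by omega) (Or.inr (by omega)),
                ih (x :: T) (b + 1) cm p (by omega) hp]
            rw [hlseqT, hlseq2, hlseqFull]
            simp [omap2, omaxO]
        · have hns : ¬ (c :: T).Sublist (x :: S) := by
            intro hsub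
            rcases List.sublist_cons_iff.1 hsub with h | ⟨rr, hrr, hsub2⟩
            · exact hskip h
            · injection hrr with h1 h2
              exact hxc h1.symm
          have hneF : (scanL (x :: S) (c :: T) b).2 ≠ [] :=
            fun hfe => hns ((scanL_done_iff _ _ _).1 hfe)
          have hlseqFull : lseq (x :: S) (c :: T) b = none := by simp [lseq, hneF]
          have hne2 : (scanL S (c :: T) (b + 1)).2 ≠ [] :=
            fun hfe => hskip ((scanL_done_iff _ _ _).1 hfe)
          have hlseq2 : lseq S (c :: T) (b + 1) = none := by simp [lseq, hne2]
          simp only [bestS, if_neg hxc]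
          rw [ih (c :: T) (b + 1) cm p (by omega) hp, hlseq2, hlseqFull]
          simp [omap2, omaxO]


-- ---------- Part 1: the BFS loop folds pvVal over the queue ----------
theorem omaxI_comm (a : Int) (u v : Option Int) : omaxI (omaxI a u) v = omaxI (omaxI a v) u := by
  cases u <;> cases v <;> simp [omaxI, max_right_comm]


theorem omaxI_omaxO (a : Int) (u v : Option Int) : omaxI a (omaxO u v) = omaxI (omaxI a u) v := by
  cases u <;> cases v <;> simp [omaxI, omaxO, max_assoc]


theorem foldl_omaxI (S T : List Char) (que : List (Int × Int × Int × Int)) :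
    ∀ (tm : Int) (v : Option Int),
    que.foldl (fun a st => omaxI a (pvVal S T st)) (omaxI tm v)
      = omaxI (que.foldl (fun a st => omaxI a (pvVal S T st)) tm) v := by
  induction que with
  | nil => intro tm v; rfl
  | cons st que ih =>
    intro tm v
    simp only [List.foldl_cons]
    rw [omaxI_comm, ih]


theorem solLoop_eq (n m : Int) (s t : String)
    (hn : 0 ≤ n) (hns : n ≤ PySem.Str.len s) (hm : 0 ≤ m) (hmt : m ≤ PySem.Str.len t) :
    ∀ (fuel : Nat) (que : List (Int × Int × Int × Int)) (tm : Int),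
      (∀ st ∈ que, pvInv n m st) → pvPhi n que ≤ fuel →
      solLoop n m s t fuel que tm
        = que.foldl (fun a st => omaxI a (pvVal (s.toList.take n.toNat) (t.toList.take m.toNat) st)) tm := by
  intro fuel
  induction fuel with
  | zero =>
    intro que tm hinv hphi
    cases que with
    | nil => rfl
    | cons st rest =>
      exfalso
      have h1 : 1 ≤ 3 ^ ((n - st.1).toNat + 1) := Nat.one_le_pow _ _ (by norm_num)
      have h2 : pvPhi n (st :: rest) = 3 ^ ((n - st.1).toNat + 1) + pvPhi n rest := by
        simp [pvPhi]
      omega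
  | succ fuel ih =>
    intro que tm hinv hphi
    cases que with
    | nil => rfl
    | cons st rest =>
      obtain ⟨curs, curt, curmax, prevs⟩ := st
      have hinvst : pvInv n m (curs, curt, curmax, prevs) := hinv _ List.mem_cons_self
      have hc0 : 0 ≤ curs := hinvst.1
      have hcn : curs ≤ n := hinvst.2.1
      have ht0 : 0 ≤ curt := hinvst.2.2.1
      have htm : curt ≤ m := hinvst.2.2.2.1
      have hpv : prevs = -1 ∨ 0 ≤ prevs := hinvst.2.2.2.2
      have hinvrest : ∀ st ∈ rest, pvInv n m st := fun st hst => hinv st (List.mem_cons_of_mem _ hst)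
      have hwpos : 1 ≤ 3 ^ ((n - curs).toNat + 1) := Nat.one_le_pow _ _ (by norm_num)
      have hphirest : pvPhi n rest ≤ fuel := by
        have h2 : pvPhi n ((curs, curt, curmax, prevs) :: rest)
            = 3 ^ ((n - curs).toNat + 1) + pvPhi n rest := by simp [pvPhi]
        omega
      have hSlen : (s.toList.take n.toNat).length = n.toNat := by
        rw [List.length_take]
        rw [PySem.Str.len_eq] at hns
        omega
      have hTlen : (t.toList.take m.toNat).length = m.toNat := by
        rw [List.length_take]
        rw [PySem.Str.len_eq] at hmt
        omega
      simp only [solLoop]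
      by_cases hguard : m - curt > n - curs
      · rw [if_pos hguard]
        have hval : pvVal (s.toList.take n.toNat) (t.toList.take m.toNat) (curs, curt, curmax, prevs) = none := by
          have hcurtm : curt < m := by
            rcases lt_or_eq_of_le htm with h | h
            · exact h
            · exfalso; omega
          unfold pvVal
          have hTne : (t.toList.take m.toNat).drop curt.toNat ≠ [] := by
            intro hnil
            have := congrArg List.length hnil
            simp [hTlen] at this
            omega
          have hlen2 : ((s.toList.take n.toNat).drop curs.toNat).length
              < ((t.toList.take m.toNat).drop curt.toNat).length := by
            simp [hSlen, hTlen]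
            omega
          rcases hTd : (t.toList.take m.toNat).drop curt.toNat with _ | ⟨c, T'⟩
          · exact absurd hTd hTne
          · rw [hTd] at hlen2
            have hnosub : ¬ (c :: T').Sublist ((s.toList.take n.toNat).drop curs.toNat) := by
              intro hsub
              have := hsub.length_le
              omega
            rw [bestS_eq _ _ _ _ _ hc0 hpv]
            have : ¬ (lseq ((s.toList.take n.toNat).drop curs.toNat) (c :: T') curs).isSome := by
              rw [lseq_isSome_iff]
              exact hnosub
            rcases hls : lseq ((s.toList.take n.toNat).drop curs.toNat) (c :: T') curs with _ | v
            · simp [omap2]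
            · rw [hls] at this; simp at this
        rw [ih rest tm hinvrest hphirest]
        simp only [List.foldl_cons, hval, omaxI]
      · rw [if_neg hguard]
        by_cases hdone : curt = m
        · rw [if_pos hdone]
          have hval : pvVal (s.toList.take n.toNat) (t.toList.take m.toNat) (curs, curt, curmax, prevs) = some curmax := by
            unfold pvVal
            have hTd : (t.toList.take m.toNat).drop curt.toNat = [] := by
              apply List.drop_eq_nil_of_le
              rw [hTlen]
              omega
            rw [hTd]
            simp [bestS]
          rw [ih rest _ hinvrest hphirest]
          simp only [List.foldl_cons, hval, omaxI]
          congr 1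
          omega
        · rw [if_neg hdone]
          have hcurtm : curt < m := by
            rcases lt_or_eq_of_le htm with h | h
            · exact h
            · exact absurd h hdone
          have hcursn : curs < n := by omega
          have hltS : curs.toNat < s.toList.length := by
            rw [PySem.Str.len_eq] at hns
            omega
          have hltT : curt.toNat < t.toList.length := by
            rw [PySem.Str.len_eq] at hmt
            omega
          have hgs : PySem.Str.pyGet? s curs = some (s.toList[curs.toNat]) := by
            have h1 := PySem.Str.pyGet?_natCast s curs.toNat
            rw [Int.toNat_of_nonneg hc0] at h1
            rw [h1, List.getElem?_eq_getElem hltS]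
          have hgt : PySem.Str.pyGet? t curt = some (t.toList[curt.toNat]) := by
            have h1 := PySem.Str.pyGet?_natCast t curt.toNat
            rw [Int.toNat_of_nonneg ht0] at h1
            rw [h1, List.getElem?_eq_getElem hltT]
          rw [hgs, hgt]
          dsimp only
          have hdropS : (s.toList.take n.toNat).drop curs.toNat
              = s.toList[curs.toNat] :: (s.toList.take n.toNat).drop (curs.toNat + 1) := by
            rw [List.drop_eq_getElem_cons (by rw [hSlen]; omega)]
            congr 1
            rw [List.getElem_take]
          have hdropT : (t.toList.take m.toNat).drop curt.toNat
              = t.toList[curt.toNat] :: (t.toList.take m.toNat).drop (curt.toNat + 1) := by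
            rw [List.drop_eq_getElem_cons (by rw [hTlen]; omega)]
            congr 1
            rw [List.getElem_take]
          have hval : pvVal (s.toList.take n.toNat) (t.toList.take m.toNat) (curs, curt, curmax, prevs)
              = omaxO
                  (if s.toList[curs.toNat] = t.toList[curt.toNat] then
                    pvVal (s.toList.take n.toNat) (t.toList.take m.toNat)
                      (curs + 1, curt + 1,
                        (if curmax < curs - prevs ∧ prevs ≠ -1 then curs - prevs else curmax), curs)
                  else none)
                  (pvVal (s.toList.take n.toNat) (t.toList.take m.toNat)
                    (curs + 1, curt, curmax, prevs)) := by
            unfold pvVal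
            simp only
            rw [hdropS, hdropT, bestS]
            have e1 : (curs + 1).toNat = curs.toNat + 1 := by omega
            have e2 : (curt + 1).toNat = curt.toNat + 1 := by omega
            rw [e1, e2]
          -- invariants and phi for the new queue
          have hchildinv : ∀ ncm np, pvInv n m (curs + 1, curt + 1, ncm, curs) ∧ pvInv n m (curs + 1, curt, np, prevs) := by
            intro ncm np
            constructor
            · exact ⟨show (0:Int) ≤ curs + 1 by omega, show curs + 1 ≤ n by omega,
                show (0:Int) ≤ curt + 1 by omega, show curt + 1 ≤ m by omega,
                Or.inr (show (0:Int) ≤ curs by omega)⟩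
            · exact ⟨show (0:Int) ≤ curs + 1 by omega, show curs + 1 ≤ n by omega,
                show (0:Int) ≤ curt by omega, show curt ≤ m by omega, hpv⟩
          have hA3 : 3 ^ ((n - curs).toNat + 1) = 3 * 3 ^ ((n - (curs + 1)).toNat + 1) := by
            have he : (n - curs).toNat = (n - (curs + 1)).toNat + 1 := by omega
            rw [he]
            ring
          have hB1 : 1 ≤ 3 ^ ((n - (curs + 1)).toNat + 1) := Nat.one_le_pow _ _ (by norm_num)
          have hphicons : pvPhi n ((curs, curt, curmax, prevs) :: rest)
              = 3 ^ ((n - curs).toNat + 1) + pvPhi n rest := by simp [pvPhi]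
          by_cases hsc : s.toList[curs.toNat] = t.toList[curt.toNat]
          · rw [if_pos hsc]
            have hque' : ∀ st ∈ (rest ++ [(curs + 1, curt + 1,
                (if curmax < curs - prevs ∧ prevs ≠ -1 then curs - prevs else curmax), curs)]) ++
                [(curs + 1, curt, curmax, prevs)], pvInv n m st := by
              intro st hst
              rcases List.mem_append.1 hst with h | h
              · rcases List.mem_append.1 h with h' | h'
                · exact hinvrest st h'
                · rw [List.mem_singleton.1 h']
                  exact (hchildinv (if curmax < curs - prevs ∧ prevs ≠ -1 then curs - prevs else curmax) 0).1
              · rw [List.mem_singleton.1 h]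
                exact (hchildinv 0 curmax).2
            have hphi' : pvPhi n ((rest ++ [(curs + 1, curt + 1,
                (if curmax < curs - prevs ∧ prevs ≠ -1 then curs - prevs else curmax), curs)]) ++
                [(curs + 1, curt, curmax, prevs)]) ≤ fuel := by
              have hx : pvPhi n ((rest ++ [(curs + 1, curt + 1,
                  (if curmax < curs - prevs ∧ prevs ≠ -1 then curs - prevs else curmax), curs)]) ++
                  [(curs + 1, curt, curmax, prevs)])
                  = pvPhi n rest + 3 ^ ((n - (curs + 1)).toNat + 1)
                    + 3 ^ ((n - (curs + 1)).toNat + 1) := by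
                simp [pvPhi]
                omega
              omega
            rw [ih _ tm hque' hphi']
            rw [List.foldl_append, List.foldl_append]
            simp only [List.foldl_cons, List.foldl_nil]
            rw [if_pos hsc] at hval
            rw [← omaxI_omaxO, ← hval]
            rw [foldl_omaxI]
          · rw [if_neg hsc]
            have hque' : ∀ st ∈ rest ++ [(curs + 1, curt, curmax, prevs)], pvInv n m st := by
              intro st hst
              rcases List.mem_append.1 hst with h | h
              · exact hinvrest st h
              · rw [List.mem_singleton.1 h]
                exact (hchildinv 0 curmax).2
            have hphi' : pvPhi n (rest ++ [(curs + 1, curt, curmax, prevs)]) ≤ fuel := by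
              have hx : pvPhi n (rest ++ [(curs + 1, curt, curmax, prevs)])
                  = pvPhi n rest + 3 ^ ((n - (curs + 1)).toNat + 1) := by
                simp [pvPhi]
              omega
            rw [ih _ tm hque' hphi']
            rw [List.foldl_append]
            simp only [List.foldl_cons, List.foldl_nil]
            have hvalskip : pvVal (s.toList.take n.toNat) (t.toList.take m.toNat) (curs, curt, curmax, prevs)
                = pvVal (s.toList.take n.toNat) (t.toList.take m.toNat) (curs + 1, curt, curmax, prevs) := by
              rw [hval, if_neg hsc]
              cases hv : pvVal (s.toList.take n.toNat) (t.toList.take m.toNat) (curs + 1, curt, curmax, prevs) <;> simp [omaxO]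
            rw [← hvalskip]
            rw [foldl_omaxI]


-- ---------- Part 3: B's port computes the same greedy value ----------
theorem pvGet_some (s : String) (i : Int) (h0 : 0 ≤ i) (h1 : i.toNat < s.toList.length) :
    PySem.Str.pyGet? s i = some (s.toList[i.toNat]) := by
  have h2 := PySem.Str.pyGet?_natCast s i.toNat
  rw [Int.toNat_of_nonneg h0] at h2
  rw [h2, List.getElem?_eq_getElem h1]

theorem mlWhile_eq_fm (s : String) (ch : Char) : ∀ (L : List Char) (i : Int) (k : Nat),
    0 ≤ i → L = s.toList.drop i.toNat → L.length ≤ k →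
    mlWhile s ch i k = fm ch L i := by
  intro L
  induction L with
  | nil =>
    intro i k h0 hL hk
    have hlen : s.toList.length ≤ i.toNat := by
      rw [← List.drop_eq_nil_iff]
      exact hL.symm
    cases k with
    | zero => simp [mlWhile, fm]
    | succ k =>
      simp only [mlWhile, fm]
      rw [if_neg]
      intro hc
      rw [PySem.Str.len_eq] at hc
      omega
  | cons x L ihL =>
    intro i k h0 hL hk
    have hi : i.toNat < s.toList.length := by
      by_contra hcon
      rw [List.drop_eq_nil_of_le (by omega)] at hL
      exact absurd hL (by simp)
    have hgs := pvGet_some s i h0 hi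
    have hxL : x :: L = s.toList[i.toNat] :: s.toList.drop (i.toNat + 1) := by
      rw [hL, List.drop_eq_getElem_cons hi]
    have hx : x = s.toList[i.toNat] := by injection hxL
    have hL' : L = s.toList.drop (i.toNat + 1) := by injection hxL with h1 h2
    cases k with
    | zero => simp at hk
    | succ k =>
      simp only [mlWhile, fm]
      by_cases hxc : x = ch
      · rw [if_neg, if_pos hxc]
        intro hc
        rw [hgs, ← hx, hxc] at hc
        exact hc.2 rfl
      · rw [if_pos, if_neg hxc]
        · have he : (i + 1).toNat = i.toNat + 1 := by omega
          apply ihL (i + 1) k (by omega)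
          · rw [he, hL']
          · simp at hk
            omega
        · constructor
          · rw [PySem.Str.len_eq]
            omega
          · rw [hgs, ← hx]
            intro hc
            injection hc with hc2
            exact hxc hc2


theorem fm_bounds (ch : Char) : ∀ (L : List Char) (i : Int),
    i ≤ fm ch L i ∧ fm ch L i ≤ i + L.length := by
  intro L
  induction L with
  | nil => intro i; simp [fm]
  | cons x L ih =>
    intro i
    simp only [fm]
    by_cases hxc : x = ch
    · rw [if_pos hxc]
      simp
      positivity
    · rw [if_neg hxc]
      have := ih (i + 1)
      simp only [List.length_cons]
      push_cast
      omega


theorem lseq_cons_fm (s : String) (ch : Char) (T : List Char) : ∀ (L : List Char) (i : Int),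
    0 ≤ i → i ≤ PySem.Str.len s → L = s.toList.drop i.toNat →
    lseq L (ch :: T) i
      = (if fm ch L i = PySem.Str.len s then none
         else (lseq (s.toList.drop ((fm ch L i).toNat + 1)) T (fm ch L i + 1)).map (fm ch L i :: ·)) := by
  intro L
  induction L with
  | nil =>
    intro i h0 hle hL
    have hlen : s.toList.length ≤ i.toNat := by
      rw [← List.drop_eq_nil_iff]
      exact hL.symm
    have hieq : i = PySem.Str.len s := by
      rw [PySem.Str.len_eq] at hle ⊢
      omega
    simp only [fm]
    rw [if_pos hieq]
    simp [lseq, scanL]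
  | cons x L ih =>
    intro i h0 hle hL
    have hi : i.toNat < s.toList.length := by
      by_contra hcon
      rw [List.drop_eq_nil_of_le (by omega)] at hL
      exact absurd hL (by simp)
    have hxL : x :: L = s.toList[i.toNat] :: s.toList.drop (i.toNat + 1) := by
      rw [hL, List.drop_eq_getElem_cons hi]
    have hL' : L = s.toList.drop (i.toNat + 1) := by injection hxL with h1 h2
    by_cases hxc : x = ch
    · subst hxc
      simp only [fm, if_true]
      rw [if_neg (by rw [PySem.Str.len_eq]; omega)]
      rw [← hL']
      rcases hcase : (scanL L T (i + 1)).2 with _ | ⟨e, rest⟩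
      · simp [lseq, scanL, hcase]
      · simp [lseq, scanL, hcase]
    · simp only [fm, if_neg hxc]
      have he : (i + 1).toNat = i.toNat + 1 := by omega
      have hlseq : lseq (x :: L) (ch :: T) i = lseq L (ch :: T) (i + 1) := by
        simp [lseq, scanL, hxc]
      rw [hlseq]
      apply ih (i + 1) (by omega)
      · rw [PySem.Str.len_eq]
        omega
      · rw [he, hL']

theorem matchLeftAux_eq (s : String) : ∀ (T : List Char) (i : Int) (acc : List Int),
    0 ≤ i → i ≤ PySem.Str.len s →
    matchLeftAux s T i acc = (lseq (s.toList.drop i.toNat) T i).map (acc ++ ·) := by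
  intro T
  induction T with
  | nil =>
    intro i acc h0 hle
    simp [matchLeftAux, lseq, scanL]
  | cons ch T ih =>
    intro i acc h0 hle
    have hkL : (s.toList.drop i.toNat).length ≤ (PySem.Str.len s - i).toNat := by
      rw [PySem.Str.len_eq] at hle ⊢
      rw [List.length_drop]
      omega
    have hml : mlWhile s ch i (PySem.Str.len s - i).toNat = fm ch (s.toList.drop i.toNat) i :=
      mlWhile_eq_fm s ch (s.toList.drop i.toNat) i _ h0 rfl hkL
    have hfb := fm_bounds ch (s.toList.drop i.toNat) i
    have hfmax : fm ch (s.toList.drop i.toNat) i ≤ PySem.Str.len s := by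
      have h2 := hfb.2
      rw [List.length_drop] at h2
      rw [PySem.Str.len_eq] at hle ⊢
      omega
    simp only [matchLeftAux]
    rw [hml]
    rw [lseq_cons_fm s ch T (s.toList.drop i.toNat) i h0 hle rfl]
    by_cases hdone : fm ch (s.toList.drop i.toNat) i = PySem.Str.len s
    · rw [if_pos hdone, if_pos hdone]
      simp
    · rw [if_neg hdone, if_neg hdone]
      rw [ih (fm ch (s.toList.drop i.toNat) i + 1) (acc ++ [fm ch (s.toList.drop i.toNat) i])
        (by omega) (by omega)]
      have he : (fm ch (s.toList.drop i.toNat) i + 1).toNat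
          = (fm ch (s.toList.drop i.toNat) i).toNat + 1 := by omega
      rw [he]
      cases lseq (s.toList.drop ((fm ch (s.toList.drop i.toNat) i).toNat + 1)) T
          (fm ch (s.toList.drop i.toNat) i + 1) with
      | none => simp
      | some v => simp


theorem gmax_fold : ∀ (l' r' : List Int) (cm q : Int),
    l'.length = r'.length → 0 ≤ q → (∀ z ∈ l', 0 ≤ z) →
    gmax cm q l' r' =
      ((q :: l').dropLast.zip r').foldl
        (fun ans pq => if pq.2 - pq.1 > ans then pq.2 - pq.1 else ans) cm := by
  intro l'
  induction l' with

  | nil =>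
    intro r' cm q hlen hq hpos
    have : r' = [] := by
      cases r' with
      | nil => rfl
      | cons a as => simp at hlen
    subst this
    simp [gmax]
  | cons x l ih =>
    intro r' cm q hlen hq hpos
    cases r' with
    | nil => simp at hlen
    | cons y r =>
      simp only [gmax]
      rw [if_neg (by omega : ¬ q = -1)]
      rw [ih r (max cm (y - q)) x (by simpa using hlen) (hpos x List.mem_cons_self)
        (fun z hz => hpos z (List.mem_cons_of_mem _ hz))]
      rw [List.dropLast_cons₂]
      simp only [List.zip_cons_cons, List.foldl_cons]
      congr 1
      split_ifs <;> omega


theorem loop_eq_gmax (x y : Int) (l rtl : List Int) (K : Int)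
    (hK : K = (l.length : Int)) (hzlen : l.length = rtl.length)
    (hx0 : 0 ≤ x) (hlpos : ∀ z ∈ l, 0 ≤ z) :
    (PySem.List.pyRange 0 K 1).foldl
      (fun ans j => if PySem.List.pyGetD (y :: rtl) (j + 1) 0 - PySem.List.pyGetD (x :: l) j 0 > ans
        then PySem.List.pyGetD (y :: rtl) (j + 1) 0 - PySem.List.pyGetD (x :: l) j 0 else ans) 0
    = max 0 (gmax 0 (-1) (x :: l) (y :: rtl)) := by
  subst hK
  rw [PySem.List.pyRange_one, List.foldl_map]
  simp only [zero_add, sub_zero, Int.toNat_natCast]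
  have hz : (List.range l.length).map
        (fun (k : Nat) => (PySem.List.pyGetD (x :: l) ((k : Int)) 0,
                           PySem.List.pyGetD (y :: rtl) ((k : Int) + 1) 0))
      = (x :: l).dropLast.zip rtl := by
    apply List.ext_getElem
    · simp
      omega
    · intro k hk1 hk2
      simp only [List.getElem_map, List.getElem_range, List.getElem_zip]
      have hka : k < (x :: l).length := by
        simp at hk1 ⊢
        omega
      have hkb : k + 1 < (y :: rtl).length := by
        simp at hk1 ⊢
        omega
      rw [PySem.List.pyGetD_eq_getElem _ _ (by positivity) (by exact_mod_cast hka)]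
      rw [show ((k : Int) + 1) = ((k + 1 : Nat) : Int) by push_cast; ring]
      rw [PySem.List.pyGetD_eq_getElem _ _ (by positivity) (by exact_mod_cast hkb)]
      congr 1
      simp only [Int.toNat_natCast]
      exact (List.getElem_dropLast _).symm
  calc (List.range l.length).foldl
        (fun ans (k : Nat) => if PySem.List.pyGetD (y :: rtl) ((k : Int) + 1) 0
            - PySem.List.pyGetD (x :: l) (k : Int) 0 > ans
          then PySem.List.pyGetD (y :: rtl) ((k : Int) + 1) 0
            - PySem.List.pyGetD (x :: l) (k : Int) 0 else ans) 0
      = ((x :: l).dropLast.zip rtl).foldl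
          (fun ans pq => if pq.2 - pq.1 > ans then pq.2 - pq.1 else ans) 0 := by
        rw [← hz, List.foldl_map]
    _ = gmax 0 x l rtl := (gmax_fold l rtl 0 x hzlen hx0 hlpos).symm
    _ = gmax 0 (-1) (x :: l) (y :: rtl) := by simp [gmax]
    _ = max 0 (gmax 0 (-1) (x :: l) (y :: rtl)) :=
        (max_eq_right (gmax_ge (x :: l) (y :: rtl) 0 (-1))).symm

set_option maxHeartbeats 1000000 in
theorem solution_alt_eq (n m : Int) (s t : String)
    (hn : 0 ≤ n) (_hns : n ≤ PySem.Str.len s) (hm : 0 ≤ m) (_hmt : m ≤ PySem.Str.len t)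
    (hmn : m ≤ n) :
    solution_alt n m s t
      = omaxI 0 (omap2 (gmax 0 (-1))
          (lseq (s.toList.take n.toNat) (t.toList.take m.toNat) 0)
          (rpos (s.toList.take n.toNat) (t.toList.take m.toNat) 0)) := by
  have hs1 : (PySem.Str.slice s none (some n)).toList = s.toList.take n.toNat := by
    rw [PySem.Str.toList_slice, PySem.Chars.slice_eq_listSlice, PySem.List.slice_to s.toList hn]
  have ht1 : (PySem.Str.slice t none (some m)).toList = t.toList.take m.toNat := by
    rw [PySem.Str.toList_slice, PySem.Chars.slice_eq_listSlice, PySem.List.slice_to t.toList hm]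
  have hlen1 : PySem.Str.len (PySem.Str.slice s none (some n)) = ((s.toList.take n.toNat).length : Int) := by
    rw [PySem.Str.len_eq, hs1]
  have hlent : PySem.Str.len (PySem.Str.slice t none (some m)) = ((t.toList.take m.toNat).length : Int) := by
    rw [PySem.Str.len_eq, ht1]
  have hid : ∀ o : Option (List Int), o.map (fun l => ([] : List Int) ++ l) = o := by
    intro o; cases o <;> simp
  have hmfwd : matchLeft (PySem.Str.slice s none (some n)) (PySem.Str.slice t none (some m))
      = lseq (s.toList.take n.toNat) (t.toList.take m.toNat) 0 := by
    unfold matchLeft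
    rw [matchLeftAux_eq (PySem.Str.slice s none (some n)) (PySem.Str.slice t none (some m)).toList 0 []
      (le_refl 0) (by rw [PySem.Str.len_eq]; positivity)]
    rw [show ((0 : Int).toNat) = 0 from rfl, List.drop_zero, hs1, ht1, hid]
  unfold solution_alt
  rw [if_neg (by omega : ¬ n < m)]
  rw [hmfwd]
  rcases hE : lseq (s.toList.take n.toNat) (t.toList.take m.toNat) 0 with _ | a
  · simp [omap2, omaxI]
  · dsimp only
    have hfeas : (t.toList.take m.toNat).Sublist (s.toList.take n.toNat) := by
      rw [← lseq_isSome_iff _ _ 0, hE]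
      rfl
    have hrS : (rpos (s.toList.take n.toNat) (t.toList.take m.toNat) 0).isSome :=
      (rpos_isSome_iff _ _ _).2 hfeas
    obtain ⟨r, hr⟩ := Option.isSome_iff_exists.1 hrS
    have halen : a.length = (t.toList.take m.toNat).length := by
      have hfe : (scanL (s.toList.take n.toNat) (t.toList.take m.toNat) 0).2 = [] := by
        by_contra hne
        simp [lseq, hne] at hE
      have ha : a = (scanL (s.toList.take n.toNat) (t.toList.take m.toNat) 0).1 := by
        simp [lseq, hfe] at hE
        exact hE.symm
      rw [ha]
      exact scanL_len _ _ _ hfe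
    have hrlen : r.length = (t.toList.take m.toNat).length := rpos_len _ _ _ r hr
    have hapos : ∀ z ∈ a, 0 ≤ z := by
      intro z hz
      have hfe : (scanL (s.toList.take n.toNat) (t.toList.take m.toNat) 0).2 = [] := by
        by_contra hne
        simp [lseq, hne] at hE
      have ha : a = (scanL (s.toList.take n.toNat) (t.toList.take m.toNat) 0).1 := by
        simp [lseq, hfe] at hE
        exact hE.symm
      rw [ha] at hz
      have := (scanL_mem_bounds _ _ 0 z hz).1
      omega
    by_cases hsmall : PySem.Str.len (PySem.Str.slice t none (some m)) < 2
    · rw [if_pos hsmall]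
      rw [hlent] at hsmall
      rw [hr]
      simp only [omap2, omaxI]
      have hlt : (t.toList.take m.toNat).length < 2 := by exact_mod_cast hsmall
      rcases a with _ | ⟨x, _ | ⟨x2, arest⟩⟩
      · simp [gmax]
      · rcases r with _ | ⟨y, _ | ⟨y2, rrest⟩⟩
        · exfalso; simp at halen hrlen hlt; omega
        · simp [gmax]
        · exfalso; simp at halen hrlen hlt; omega
      · exfalso; simp at halen hlt; omega
    · rw [if_neg hsmall]
      rw [hlent] at hsmall
      have hT2 : 2 ≤ (t.toList.take m.toNat).length := by omega
      -- the reversed strings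
      have hsrev : ((PySem.Str.slice? (PySem.Str.slice s none (some n)) none none (-1)).getD "").toList
          = (s.toList.take n.toNat).reverse := by
        rw [PySem.Str.slice?_none_none_neg_one]
        simp only [Option.getD_some]
        rw [String.toList_ofList, hs1]
      have htrev : ((PySem.Str.slice? (PySem.Str.slice t none (some m)) none none (-1)).getD "").toList
          = (t.toList.take m.toNat).reverse := by
        rw [PySem.Str.slice?_none_none_neg_one]
        simp only [Option.getD_some]
        rw [String.toList_ofList, ht1]
      have hmrev : matchLeft ((PySem.Str.slice? (PySem.Str.slice s none (some n)) none none (-1)).getD "")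
            ((PySem.Str.slice? (PySem.Str.slice t none (some m)) none none (-1)).getD "")
          = lseq (s.toList.take n.toNat).reverse (t.toList.take m.toNat).reverse 0 := by
        unfold matchLeft
        rw [matchLeftAux_eq _ _ 0 [] (le_refl 0)
          (by rw [PySem.Str.len_eq]; exact Int.natCast_nonneg _)]
        rw [show ((0 : Int).toNat) = 0 from rfl, List.drop_zero, hsrev, htrev, hid]
      rw [hmrev]
      have hrevSome : (lseq (s.toList.take n.toNat).reverse (t.toList.take m.toNat).reverse 0).isSome := by
        rw [lseq_isSome_iff]
        exact List.reverse_sublist.2 hfeas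
      rcases hrb : lseq (s.toList.take n.toNat).reverse (t.toList.take m.toNat).reverse 0 with _ | rb
      · rw [hrb] at hrevSome; simp at hrevSome
      · have hrposv : rpos (s.toList.take n.toNat) (t.toList.take m.toNat) 0
            = some (rref (s.toList.take n.toNat) 0 rb) := by
          unfold rpos
          rw [hrb]
          rfl
        have hrval : r = rref (s.toList.take n.toNat) 0 rb := by
          rw [hr] at hrposv
          injection hrposv
        have hbarr : List.map (fun q => PySem.Str.len (PySem.Str.slice s none (some n)) - 1 - q) rb.reverse
            = rref (s.toList.take n.toNat) 0 rb := by
          unfold rref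
          apply List.map_congr_left
          intro q _
          rw [hlen1]
          ring
        dsimp only
        rw [hbarr, ← hrval, hr]
        simp only [omap2, omaxI]
        -- decompose a and r
        obtain ⟨x, l, rfl⟩ : ∃ x l, a = x :: l := by
          rcases a with _ | ⟨x, l⟩
          · exfalso; simp at halen hT2; omega
          · exact ⟨x, l, rfl⟩
        obtain ⟨y, rtl, rfl⟩ : ∃ y rtl, r = y :: rtl := by
          rcases r with _ | ⟨y, rtl⟩
          · exfalso; simp at hrlen hT2; omega
          · exact ⟨y, rtl, rfl⟩
        have hstep : gmax 0 (-1) (x :: l) (y :: rtl) = gmax 0 x l rtl := by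
          simp [gmax]
        have hx0 : 0 ≤ x := hapos x List.mem_cons_self
        have hlpos : ∀ z ∈ l, 0 ≤ z := fun z hz => hapos z (List.mem_cons_of_mem _ hz)
        have hzlen : l.length = rtl.length := by
          simp at halen hrlen
          omega
        have hlen3 : l.length + 1 = (t.toList.take m.toNat).length := by
          simpa using halen
        rw [hlent]
        exact loop_eq_gmax x y l rtl _ (by omega) hzlen hx0 hlpos


theorem solution_prune (n m : Int) (s t : String) (h : n < m) : solution n m s t = 0 := by
  unfold solution
  cases hf : 3 ^ (n.toNat + 2) with
  | zero => rfl
  | succ f =>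
    simp only [solLoop]
    rw [if_pos (by omega : m - 0 > n - 0)]
    cases f <;> rfl

-- ===== VERDICT (by name: the statement is the Claim_ definition above) =====
theorem solution_spec : Claim_equal_solution := by
  intro n m s t _hdom hpre
  unfold Spec_solution
  rcases hpre with hlt | ⟨hm, hmn, hns, hmt⟩
  · rw [solution_prune n m s t hlt]
    unfold solution_alt
    rw [if_pos hlt]
  · have hn : 0 ≤ n := le_trans hm hmn
    have hloop := solLoop_eq n m s t hn hns hm hmt (3 ^ (n.toNat + 2)) [(0, 0, 0, -1)] 0
      (by
        intro st hst
        rw [List.mem_singleton.1 hst]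
        exact ⟨show (0 : Int) ≤ 0 from le_refl 0, show (0 : Int) ≤ n from hn,
          show (0 : Int) ≤ 0 from le_refl 0, show (0 : Int) ≤ m from hm,
          Or.inl (show (-1 : Int) = -1 from rfl)⟩)
      (by
        have h1 : pvPhi n [(0, 0, 0, -1)] = 3 ^ ((n - 0).toNat + 1) := by simp [pvPhi]
        rw [h1]
        exact Nat.pow_le_pow_right (by norm_num) (by omega))
    unfold solution
    rw [hloop]
    simp only [List.foldl_cons, List.foldl_nil]
    have hval : pvVal (s.toList.take n.toNat) (t.toList.take m.toNat) (0, 0, 0, -1)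
        = bestS (s.toList.take n.toNat) (t.toList.take m.toNat) 0 0 (-1) := by
      unfold pvVal
      rw [show ((0 : Int).toNat) = 0 from rfl, List.drop_zero, List.drop_zero]
    rw [hval, bestS_eq _ _ 0 0 (-1) (le_refl 0) (Or.inl rfl)]
    rw [solution_alt_eq n m s t hn hns hm hmt hmn]
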